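-- pv_equiv track=rewrite | github.com/Drellimal2/Hackerrank | Implementation/Easy/Electronics Shop/solution.py | getMoneySpent
-- ===== SOURCE A (Python) =====
-- def getMoneySpent(keyboards, drives, s):
--     mx = -1
--     for keyboard in keyboards:
--         if keyboard >= s:
--             continue
--         for drive in drives:
--             if drive + keyboard > s:
--                 continue
--             mx = max(mx, drive + keyboard)
--     return mx
-- ===== SOURCE B (Python) =====
-- def getMoneySpent(keyboards, drives, s):
--     ds = sorted(drives)
--     n = len(ds)
--     best = -1
--     for kb in keyboards:
--         if kb >= s:
--             continue
--         c = s - kb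
--         # rightmost insertion point: lo = number of drives <= c
--         lo, hi = 0, n
--         while lo < hi:
--             mid = (lo + hi) // 2
--             if ds[mid] <= c:
--                 lo = mid + 1
--             else:
--                 hi = mid
--         if lo > 0:
--             best = max(best, kb + ds[lo - 1])
--     return best
-- ===== Notes on version B (the rewrite author's own statement) =====
-- stated objective: faster
-- what changed: Replace the inner linear scan over drives by sorting drives once and binary-searching the largest affordable drive for each keyboard.
import Mathlib
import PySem

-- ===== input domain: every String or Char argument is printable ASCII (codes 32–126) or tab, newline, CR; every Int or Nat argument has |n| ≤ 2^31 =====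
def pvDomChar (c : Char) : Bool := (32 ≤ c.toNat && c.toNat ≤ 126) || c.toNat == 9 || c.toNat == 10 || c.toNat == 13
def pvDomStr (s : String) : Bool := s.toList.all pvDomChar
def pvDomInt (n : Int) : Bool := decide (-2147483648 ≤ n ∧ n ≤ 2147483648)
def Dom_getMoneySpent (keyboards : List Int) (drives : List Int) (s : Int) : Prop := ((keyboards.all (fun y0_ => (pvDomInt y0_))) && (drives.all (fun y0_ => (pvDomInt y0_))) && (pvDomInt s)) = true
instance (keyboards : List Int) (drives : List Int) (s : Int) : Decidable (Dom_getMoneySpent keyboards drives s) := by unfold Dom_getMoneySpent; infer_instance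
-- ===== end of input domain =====

-- B sorts drives once and binary-searches the largest affordable drive per keyboard (asymptotically faster than A's nested scan).

-- ===== PORT A =====
def getMoneySpent (keyboards : List Int) (drives : List Int) (s : Int) : Int :=
  keyboards.foldl (fun mx keyboard =>
    if keyboard ≥ s then mx
    else drives.foldl (fun mx drive =>
      if drive + keyboard > s then mx else max mx (drive + keyboard)) mx) (-1)

-- ===== PORT B =====
-- the while-loop binary search of Source B; the index mid is always in [0, len ds), so pyGetD's default is never used
def pvBs (ds : List Int) (c : Int) (lo hi : Int) : Int :=
  if h : lo < hi then
    let mid := PySem.Int.floordiv (lo + hi) 2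
    if PySem.List.pyGetD ds mid 0 ≤ c then pvBs ds c (mid + 1) hi
    else pvBs ds c lo mid
  else lo
termination_by (hi - lo).toNat
decreasing_by
  · have hb := PySem.Int.floordiv_two_mid_bounds (le_of_lt h)
    omega
  · have hb := PySem.Int.floordiv_two_mid_bounds (le_of_lt h)
    have hlt : PySem.Int.floordiv (lo + hi) 2 < hi := by
      rw [PySem.Int.floordiv_lt_iff_lt_mul (by omega : (0:Int) < 2)]; omega
    omega

def getMoneySpent_alt (keyboards : List Int) (drives : List Int) (s : Int) : Int :=
  let ds := PySem.List.sorted drives (fun x => x) false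
  let n : Int := ds.length
  keyboards.foldl (fun best kb =>
    if kb ≥ s then best
    else
      let c := s - kb
      let lo := pvBs ds c 0 n
      if lo > 0 then max best (kb + PySem.List.pyGetD ds (lo - 1) 0) else best) (-1)

-- ===== PRECONDITION & SPEC =====
def Spec_getMoneySpent (keyboards : List Int) (drives : List Int) (s : Int) (out : Int) : Prop := out = getMoneySpent_alt keyboards drives s
instance (keyboards : List Int) (drives : List Int) (s : Int) (out : Int) : Decidable (Spec_getMoneySpent keyboards drives s out) := by unfold Spec_getMoneySpent; infer_instance

-- ===== CLAIM (what is proved, stated in full; the proofs are below) =====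
def Claim_equal_getMoneySpent : Prop := ∀ (keyboards : List Int) (drives : List Int) (s : Int), Dom_getMoneySpent keyboards drives s → Spec_getMoneySpent keyboards drives s (getMoneySpent keyboards drives s)



-- ===== LEMMAS AND PROOFS =====

-- sorted lists are monotone in getD
theorem pvGetD_mono (ds : List Int) (hsort : ds.Pairwise (· ≤ ·)) (i j : Nat)
    (hij : i ≤ j) (hj : j < ds.length) : ds.getD i 0 ≤ ds.getD j 0 := by
  rcases eq_or_lt_of_le hij with rfl | h
  · exact le_refl _
  · have hi : i < ds.length := lt_trans h hj
    have := (List.pairwise_iff_getElem.mp hsort) i j hi hj h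
    rwa [List.getD_eq_getElem ds 0 hi, List.getD_eq_getElem ds 0 hj]

-- binary-search characterisation: on a sorted list, pvBs returns the split point between ≤ c and > c
theorem pvBs_spec (ds : List Int) (c : Int) (hsort : ds.Pairwise (· ≤ ·)) :
    ∀ lo hi : Int, 0 ≤ lo → lo ≤ hi → hi ≤ ds.length →
    (∀ i : Nat, i < lo.toNat → ds.getD i 0 ≤ c) →
    (∀ i : Nat, hi.toNat ≤ i → i < ds.length → c < ds.getD i 0) →
    0 ≤ pvBs ds c lo hi ∧ pvBs ds c lo hi ≤ ds.length ∧
    (∀ i : Nat, i < (pvBs ds c lo hi).toNat → ds.getD i 0 ≤ c) ∧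
    (∀ i : Nat, (pvBs ds c lo hi).toNat ≤ i → i < ds.length → c < ds.getD i 0) := by
  intro lo hi
  induction lo, hi using pvBs.induct ds c with
  | case1 lo hi h mid hcmp ih =>
    intro h0 hlh hhl Hlo Hhi
    have hb : lo ≤ mid ∧ mid ≤ hi := PySem.Int.floordiv_two_mid_bounds (le_of_lt h)
    have hlt : mid < hi := by
      show PySem.Int.floordiv (lo + hi) 2 < hi
      rw [PySem.Int.floordiv_lt_iff_lt_mul (by omega : (0:Int) < 2)]; omega
    have hmlen : mid < (ds.length : Int) := lt_of_lt_of_le hlt hhl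
    have hget : PySem.List.pyGetD ds mid 0 = ds.getD mid.toNat 0 := by
      rw [PySem.List.pyGetD_eq_getElem ds 0 (by omega) hmlen]
      exact (List.getD_eq_getElem ds 0 (by omega : mid.toNat < ds.length)).symm
    rw [pvBs]
    simp only [dif_pos h]
    rw [if_pos (show PySem.List.pyGetD ds (PySem.Int.floordiv (lo + hi) 2) 0 ≤ c from hcmp)]
    apply ih (by omega) (by omega) hhl
    · intro i hi2
      have hmono : ds.getD i 0 ≤ ds.getD mid.toNat 0 :=
        pvGetD_mono ds hsort i mid.toNat (by omega) (by omega)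
      have hc : ds.getD mid.toNat 0 ≤ c := by rw [← hget]; exact hcmp
      omega
    · exact Hhi
  | case2 lo hi h mid hcmp ih =>
    intro h0 hlh hhl Hlo Hhi
    have hb : lo ≤ mid ∧ mid ≤ hi := PySem.Int.floordiv_two_mid_bounds (le_of_lt h)
    have hlt : mid < hi := by
      show PySem.Int.floordiv (lo + hi) 2 < hi
      rw [PySem.Int.floordiv_lt_iff_lt_mul (by omega : (0:Int) < 2)]; omega
    have hmlen : mid < (ds.length : Int) := lt_of_lt_of_le hlt hhl
    have hget : PySem.List.pyGetD ds mid 0 = ds.getD mid.toNat 0 := by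
      rw [PySem.List.pyGetD_eq_getElem ds 0 (by omega) hmlen]
      exact (List.getD_eq_getElem ds 0 (by omega : mid.toNat < ds.length)).symm
    rw [pvBs]
    simp only [dif_pos h]
    rw [if_neg (show ¬ PySem.List.pyGetD ds (PySem.Int.floordiv (lo + hi) 2) 0 ≤ c from hcmp)]
    apply ih h0 (by omega) (by omega) Hlo
    · intro i hi1 hi2
      have hmono : ds.getD mid.toNat 0 ≤ ds.getD i 0 :=
        pvGetD_mono ds hsort mid.toNat i (by omega) hi2
      have hc : c < ds.getD mid.toNat 0 := by rw [← hget]; omega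
      omega
  | case3 lo hi h =>
    intro h0 hlh hhl Hlo Hhi
    rw [pvBs]
    simp only [dif_neg h]
    have : lo = hi := le_antisymm hlh (by omega)
    subst this
    exact ⟨h0, hhl, Hlo, Hhi⟩

-- the inner scan is the identity on elements that bust the budget
theorem pvFoldl_all_gt (kb s : Int) :
    ∀ (l : List Int) (m : Int), (∀ d ∈ l, d + kb > s) →
    l.foldl (fun mx drive => if drive + kb > s then mx else max mx (drive + kb)) m = m := by
  intro l
  induction l with
  | nil => intro m _; rfl
  | cons a l ih =>
    intro m hall
    have ha : a + kb > s := hall a (by simp)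
    simp only [List.foldl_cons, if_pos ha]
    exact ih m (fun d hd => hall d (by simp [hd]))

-- the inner scan over a sorted all-affordable list keeps the last (largest) sum
theorem pvFoldl_all_le (kb s : Int) :
    ∀ (l : List Int) (m : Int), l.Pairwise (· ≤ ·) → (∀ d ∈ l, d + kb ≤ s) →
    l.foldl (fun mx drive => if drive + kb > s then mx else max mx (drive + kb)) m =
      (match l.getLast? with | none => m | some d => max m (d + kb)) := by
  intro l
  induction l with
  | nil => intro m _ _; rfl
  | cons a l ih =>
    intro m hsort hall
    have ha : ¬ (a + kb > s) := by have := hall a (by simp); omega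
    simp only [List.foldl_cons, if_neg ha]
    rw [ih (max m (a + kb)) hsort.of_cons (fun d hd => hall d (by simp [hd]))]
    cases hl : l.getLast? with
    | none =>
      have : l = [] := List.getLast?_eq_none_iff.mp hl
      subst this; rfl
    | some d =>
      have hd : d ∈ l := List.mem_of_getLast? hl
      have had : a ≤ d := (List.pairwise_cons.mp hsort).1 d hd
      have hlast : (a :: l).getLast? = some d := by
        cases l with
        | nil => simp at hl
        | cons b l' => rw [List.getLast?_cons_cons]; exact hl
      rw [hlast]
      simp only []
      omega

-- A's inner scan equals B's binary-search step on a sorted list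
theorem pvInner_eq (ds : List Int) (hsort : ds.Pairwise (· ≤ ·)) (kb s m0 : Int) :
    ds.foldl (fun mx drive => if drive + kb > s then mx else max mx (drive + kb)) m0 =
    (if pvBs ds (s - kb) 0 ds.length > 0
     then max m0 (kb + PySem.List.pyGetD ds (pvBs ds (s - kb) 0 ds.length - 1) 0)
     else m0) := by
  obtain ⟨h0, hlen, Hle, Hgt⟩ := pvBs_spec ds (s - kb) hsort 0 (ds.length)
    (le_refl 0) (Int.natCast_nonneg _) (le_refl _)
    (by intro i hi; omega)
    (by intro i h1 h2; exfalso; omega)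
  set r := pvBs ds (s - kb) 0 (ds.length : Int) with hr
  have ht : r.toNat ≤ ds.length := by omega
  conv_lhs => rw [← List.take_append_drop r.toNat ds]
  rw [List.foldl_append]
  rw [pvFoldl_all_gt kb s _ _ (by
    intro d hd
    obtain ⟨j, hj, hjd⟩ := List.mem_iff_getElem.mp hd
    have hjl : r.toNat + j < ds.length := by
      have := hj; simp [List.length_drop] at this; omega
    have : s - kb < ds.getD (r.toNat + j) 0 := Hgt (r.toNat + j) (by omega) hjl
    rw [List.getD_eq_getElem ds 0 hjl] at this
    rw [← hjd, List.getElem_drop]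
    omega)]
  rw [pvFoldl_all_le kb s _ _ (List.Pairwise.take hsort) (by
    intro d hd
    obtain ⟨j, hj, hjd⟩ := List.mem_iff_getElem.mp hd
    have hjr : j < r.toNat := by
      have := hj; simp [List.length_take] at this; omega
    have : ds.getD j 0 ≤ s - kb := Hle j hjr
    rw [List.getD_eq_getElem ds 0 (by omega)] at this
    rw [← hjd, List.getElem_take]
    omega)]
  by_cases hpos : r > 0
  · rw [if_pos hpos]
    have htpos : 0 < r.toNat := by omega
    have hlenpos : r.toNat - 1 < ds.length := by omega
    have hget : (ds.take r.toNat).getLast? = some ds[r.toNat - 1] := by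
      rw [List.getLast?_eq_getElem?]
      have hlt : (List.take r.toNat ds).length = r.toNat := by
        simp [List.length_take]; omega
      rw [hlt]
      rw [List.getElem?_take_of_lt (by omega)]
      exact List.getElem?_eq_getElem hlenpos
    rw [hget]
    have hpy : PySem.List.pyGetD ds (r - 1) 0 = ds[r.toNat - 1] := by
      rw [PySem.List.pyGetD_eq_getElem ds 0 (by omega) (by omega)]
      congr 1
      omega
    rw [hpy]
    simp only []
    omega
  · rw [if_neg hpos]
    have : r.toNat = 0 := by omega
    rw [this]
    simp

-- ===== VERDICT (by name: the statement is the Claim_ definition above) =====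
theorem getMoneySpent_spec : Claim_equal_getMoneySpent := by
  intro keyboards drives s _
  unfold Spec_getMoneySpent getMoneySpent getMoneySpent_alt
  simp only []
  set ds := PySem.List.sorted drives (fun x => x) false with hds
  have hperm : drives.Perm ds := (PySem.List.sorted_perm drives (fun x => x) false).symm
  have hsort : ds.Pairwise (· ≤ ·) := by
    simpa using PySem.List.sorted_pairwise drives (fun x => x)
  have hstep : ∀ (acc kb : Int),
      (if kb ≥ s then acc
       else drives.foldl (fun mx drive => if drive + kb > s then mx else max mx (drive + kb)) acc) =
      (if kb ≥ s then acc
       else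
        if pvBs ds (s - kb) 0 (ds.length : Int) > 0
        then max acc (kb + PySem.List.pyGetD ds (pvBs ds (s - kb) 0 (ds.length : Int) - 1) 0)
        else acc) := by
    intro acc kb
    by_cases hk : kb ≥ s
    · simp [hk]
    · rw [if_neg hk, if_neg hk]
      haveI : RightCommutative (fun mx drive => if drive + kb > s then mx else max mx (drive + kb)) := ⟨by
        intro m a b
        by_cases h1 : a + kb > s <;> by_cases h2 : b + kb > s <;>
          simp [h1, h2] <;> omega⟩
      rw [hperm.foldl_eq acc]
      exact pvInner_eq ds hsort kb s acc
  have hfold : ∀ (ks : List Int) (acc : Int),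
      ks.foldl (fun mx keyboard =>
        if keyboard ≥ s then mx
        else drives.foldl (fun mx drive => if drive + keyboard > s then mx else max mx (drive + keyboard)) mx) acc =
      ks.foldl (fun best kb =>
        if kb ≥ s then best
        else
          if pvBs ds (s - kb) 0 (ds.length : Int) > 0
          then max best (kb + PySem.List.pyGetD ds (pvBs ds (s - kb) 0 (ds.length : Int) - 1) 0)
          else best) acc := by
    intro ks
    induction ks with
    | nil => intro acc; rfl
    | cons k ks2 ih =>
      intro acc
      simp only [List.foldl_cons]
      rw [hstep acc k]
      exact ih _
  exact hfold keyboards (-1)
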